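-- pv_equiv track=rewrite | github.com/mike1am/GB-Immersion-in-Python | HW3/HW3_task0.py | missedItems
-- ===== SOURCE A (Python) =====
-- from functools import reduce
--
-- def missedItems(itemsDict) -> dict:
--     if len(itemsDict) < 2: return {}
--
--     resDict = {}
--
--     for name, nameItems in itemsDict.items():
--         otherSeq = tuple(
--             itemsDict[key]
--             for key in itemsDict.keys()
--             if key != name
--         )
--
--         missedSet = reduce(
--             lambda res, seq: set(res) & (set(seq) - set(nameItems)),
--             otherSeq,
--             otherSeq[0] # на случай, если в списке itemsDict только 2 элемента
--         )
--         if missedSet: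
--             resDict[name] = tuple(missedSet)
--
--     return resDict
-- ===== SOURCE B (Python) =====
-- def missedItems(itemsDict) -> dict:
--     if len(itemsDict) < 2:
--         return {}
--
--     full = len(itemsDict)
--     counts = {}
--     for seq in itemsDict.values():
--         for v in dict.fromkeys(seq):
--             counts[v] = counts.get(v, 0) + 1
--
--     res = {}
--     for name, seq in itemsDict.items():
--         own = set(seq)
--         missed = tuple(v for v in counts if counts[v] == full - 1 and v not in own)
--         if missed:
--             res[name] = missed
--     return res
-- ===== Notes on version B (the rewrite author's own statement) =====
-- stated objective: faster
-- what changed: Instead of recomputing, for every name, the set-intersection of all other lists (a reduce over n-1 sets per name), B builds one occurrence counter over all lists in a single pass and reads each name's missing items off as 'count == n-1 and not in own'. Pre_ excludes association lists with duplicate names and inputs where some name's missed set has two or more elements, on which A's tuple order is CPython's accidental set-iteration (hash) order.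
-- outside the precondition, e.g. on missedItems({'a': [], 'b': [1, 8]}): A returns {'a': (8, 1)}, B returns {'a': (1, 8)}
import Mathlib
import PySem

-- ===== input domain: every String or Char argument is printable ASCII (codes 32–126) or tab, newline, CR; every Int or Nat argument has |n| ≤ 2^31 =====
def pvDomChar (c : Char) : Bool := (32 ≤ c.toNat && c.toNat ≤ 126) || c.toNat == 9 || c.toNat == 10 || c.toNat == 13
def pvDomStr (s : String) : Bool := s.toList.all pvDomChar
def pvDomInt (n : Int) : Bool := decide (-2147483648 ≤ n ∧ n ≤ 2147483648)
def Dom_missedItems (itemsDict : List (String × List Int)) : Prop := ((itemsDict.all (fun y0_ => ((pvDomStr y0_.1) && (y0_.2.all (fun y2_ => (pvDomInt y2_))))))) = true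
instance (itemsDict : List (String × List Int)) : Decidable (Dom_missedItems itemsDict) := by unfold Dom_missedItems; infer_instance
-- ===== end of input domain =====

-- B replaces A's per-name reduce over all other lists (rebuilding sets each time) by one
-- occurrence counter built in a single pass; objective: faster (asymptotic, O(n*m) vs O(n^2*m)).


-- ===== PORT A =====
-- the dict argument is an association list; resDict[name] = … is PySem.Dict.insert,
-- itemsDict[key] is PySem.Dict.getD (the key always comes from itemsDict.keys())
def missedItems (itemsDict : List (String × List Int)) : List (String × List Int) :=
  if itemsDict.length < 2 then []
  else
    (itemsDict.foldl
      (fun (resDict : PySem.Dict String (List Int)) nv =>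
        let name := nv.1
        let nameItems := nv.2
        let otherSeq :=
          ((itemsDict.map Prod.fst).filter (fun k => k != name)).map
            (fun k => PySem.Dict.getD ⟨itemsDict⟩ k [])
        let missedSet :=
          otherSeq.foldl
            (fun res seq =>
              PySem.Set.inter (PySem.Set.ofList res)
                (PySem.Set.diff (PySem.Set.ofList seq) (PySem.Set.ofList nameItems)))
            (PySem.List.pyGetD otherSeq 0 [])
        if missedSet = [] then resDict else resDict.insert name missedSet)
      PySem.Dict.empty).items

-- ===== PORT B =====
-- one pass builds counts (item ↦ in how many of the lists it occurs, each list deduplicated);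
-- a name misses exactly the items with count == n-1 that are not its own
def missedItems_alt (itemsDict : List (String × List Int)) : List (String × List Int) :=
  if itemsDict.length < 2 then []
  else
    let full : Int := itemsDict.length
    let counts : PySem.Dict Int Int :=
      itemsDict.foldl
        (fun c nv => (PySem.List.dedup nv.2).foldl (fun c v => c.modify v 0 (· + 1)) c)
        PySem.Dict.empty
    (itemsDict.foldl
      (fun (res : PySem.Dict String (List Int)) nv =>
        let own := PySem.Set.ofList nv.2
        let missed := counts.keys.filter (fun v => counts.getD v 0 == full - 1 && !(own.contains v))
        if missed = [] then res else res.insert nv.1 missed)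
      PySem.Dict.empty).items

-- ===== PRECONDITION & SPEC =====
-- Pre_ excludes association lists with duplicate names (the argument is a Python dict), and
-- inputs where some name's missed set (items in every other list but absent from its own) has
-- two or more elements: there A's tuple order is CPython's accidental set-iteration order.
def Pre_missedItems (itemsDict : List (String × List Int)) : Prop :=
  (itemsDict.map Prod.fst).Nodup ∧
  ∀ nv ∈ itemsDict, ∀ v ∈ itemsDict.flatMap Prod.snd, ∀ w ∈ itemsDict.flatMap Prod.snd,
    (v ∉ nv.2 ∧ ∀ kv ∈ itemsDict, kv.1 ≠ nv.1 → v ∈ kv.2) →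
    (w ∉ nv.2 ∧ ∀ kv ∈ itemsDict, kv.1 ≠ nv.1 → w ∈ kv.2) → v = w
instance (itemsDict : List (String × List Int)) : Decidable (Pre_missedItems itemsDict) := by
  unfold Pre_missedItems; infer_instance

def pvWitness_missedItems : (List (String × List Int)) := [("a", [1]), ("b", [2])]

def Spec_missedItems (itemsDict : List (String × List Int)) (out : List (String × List Int)) : Prop := out = missedItems_alt itemsDict
instance (itemsDict : List (String × List Int)) (out : List (String × List Int)) : Decidable (Spec_missedItems itemsDict out) := by unfold Spec_missedItems; infer_instance

-- ===== CLAIM (what is proved, stated in full; the proofs are below) =====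
def Claim_equal_missedItems : Prop := ∀ (itemsDict : List (String × List Int)), Dom_missedItems itemsDict → Pre_missedItems itemsDict → Spec_missedItems itemsDict (missedItems itemsDict)

-- ===== LEMMAS AND PROOFS =====

-- A's per-name computation, named for the proofs
def interStep (own : List Int) (res seq : List Int) : List Int :=
  PySem.Set.inter (PySem.Set.ofList res) (PySem.Set.diff (PySem.Set.ofList seq) (PySem.Set.ofList own))

def othersA (l : List (String × List Int)) (name : String) : List (List Int) :=
  ((l.map Prod.fst).filter (fun k => k != name)).map (fun k => PySem.Dict.getD ⟨l⟩ k [])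

def mA (l : List (String × List Int)) (nv : String × List Int) : List Int :=
  (othersA l nv.1).foldl (interStep nv.2) (PySem.List.pyGetD (othersA l nv.1) 0 [])

-- B's pieces, named for the proofs
def countsB (l : List (String × List Int)) : PySem.Dict Int Int :=
  l.foldl (fun c nv => (PySem.List.dedup nv.2).foldl (fun c v => c.modify v 0 (· + 1)) c)
    PySem.Dict.empty

def mB (l : List (String × List Int)) (nv : String × List Int) : List Int :=
  (countsB l).keys.filter
    (fun v => (countsB l).getD v 0 == (l.length : Int) - 1 && !((PySem.Set.ofList nv.2).contains v))

theorem missedItems_eq (l : List (String × List Int)) :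
    missedItems l = if l.length < 2 then []
      else (l.foldl (fun (res : PySem.Dict String (List Int)) nv =>
        if mA l nv = [] then res else res.insert nv.1 (mA l nv)) PySem.Dict.empty).items := rfl

theorem missedItems_alt_eq (l : List (String × List Int)) :
    missedItems_alt l = if l.length < 2 then []
      else (l.foldl (fun (res : PySem.Dict String (List Int)) nv =>
        if mB l nv = [] then res else res.insert nv.1 (mB l nv)) PySem.Dict.empty).items := rfl

-- dict lookup of a present key, under unique keys
theorem getD_of_mem_nodup (l : List (String × List Int)) (kv : String × List Int)
    (hnd : (l.map Prod.fst).Nodup) (hm : kv ∈ l) :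
    PySem.Dict.getD ⟨l⟩ kv.1 [] = kv.2 := by
  induction l with
  | nil => simp at hm
  | cons a rest ih =>
    rcases List.mem_cons.1 hm with h | h
    · subst h
      simp [PySem.Dict.getD, PySem.Dict.get?]
    · have hne : a.1 ≠ kv.1 := by
        intro he
        have : kv.1 ∈ rest.map Prod.fst := List.mem_map.2 ⟨kv, h, rfl⟩
        exact (List.nodup_cons.1 (by simpa using hnd)).1 (he ▸ this)
      have := ih (List.nodup_cons.1 (by simpa using hnd)).2 h
      simpa [PySem.Dict.getD, PySem.Dict.get?, hne] using this

-- under unique keys the key-indexed comprehension is the filtered items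
theorem othersA_eq (l : List (String × List Int)) (name : String)
    (hnd : (l.map Prod.fst).Nodup) :
    othersA l name = (l.filter (fun kv => kv.1 != name)).map Prod.snd := by
  rw [othersA, List.filter_map, List.map_map]
  apply List.map_congr_left
  intro kv hkv
  exact getD_of_mem_nodup l kv hnd (List.mem_of_mem_filter hkv)

theorem exists_other (l : List (String × List Int)) (nv : String × List Int)
    (hnd : (l.map Prod.fst).Nodup) (hm : nv ∈ l) (hlen : 2 ≤ l.length) :
    ∃ kv ∈ l, kv.1 ≠ nv.1 := by
  match l, hm with
  | a :: b :: rest, hm =>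
    have hab : a.1 ≠ b.1 := by
      simp only [List.map_cons, List.nodup_cons, List.mem_cons] at hnd
      intro h; exact hnd.1 (Or.inl h)
    rcases List.mem_cons.1 hm with h | h
    · exact ⟨b, by simp, fun e => hab (by rw [h] at e; exact e.symm)⟩
    · by_cases ha : a.1 = nv.1
      · exact ⟨b, by simp, fun e => hab (by rw [ha, e])⟩
      · exact ⟨a, by simp, ha⟩

theorem countP_split (l l1 l2 : List (String × List Int)) (nv : String × List Int) (v : Int)
    (hnd : (l.map Prod.fst).Nodup) (hsplit : l = l1 ++ nv :: l2) (hv : v ∉ nv.2) :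
    (l.countP (fun kv => decide (v ∈ kv.2)) = l.length - 1
      ↔ ∀ kv ∈ l, kv.1 ≠ nv.1 → v ∈ kv.2) := by
  subst hsplit
  have hnd' : ∀ kv ∈ l1 ++ l2, kv.1 ≠ nv.1 := by
    intro kv hkv he
    simp only [List.map_append, List.map_cons, List.nodup_append, List.nodup_cons] at hnd
    rcases List.mem_append.1 hkv with h | h
    · exact absurd (hnd.2.2 _ (List.mem_map.2 ⟨kv, h, rfl⟩)) (by simp [he])
    · exact hnd.2.1.1 (he ▸ List.mem_map.2 ⟨kv, h, rfl⟩)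
  have hle1 := List.countP_le_length (l := l1) (p := fun kv => decide (v ∈ kv.2))
  have hle2 := List.countP_le_length (l := l2) (p := fun kv => decide (v ∈ kv.2))
  rw [List.countP_append, List.countP_cons]
  simp only [hv, decide_false]
  constructor
  · intro h kv hkv hne
    have h1 : l1.countP (fun kv => decide (v ∈ kv.2)) = l1.length := by
      simp [List.length_append] at h; omega
    have h2 : l2.countP (fun kv => decide (v ∈ kv.2)) = l2.length := by
      simp [List.length_append] at h; omega
    have hkv' : kv ∈ l1 ++ l2 := by
      rcases List.mem_append.1 hkv with h | h
      · exact List.mem_append.2 (Or.inl h)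
      · rcases List.mem_cons.1 h with h | h
        · exact absurd (by rw [h]) hne
        · exact List.mem_append.2 (Or.inr h)
    rcases List.mem_append.1 hkv' with h | h
    · simpa using List.countP_eq_length.1 h1 kv h
    · simpa using List.countP_eq_length.1 h2 kv h
  · intro h
    have h1 : l1.countP (fun kv => decide (v ∈ kv.2)) = l1.length :=
      List.countP_eq_length.2 (fun kv hkv => by
        simpa using h kv (by simp [hkv]) (hnd' kv (List.mem_append.2 (Or.inl hkv))))
    have h2 : l2.countP (fun kv => decide (v ∈ kv.2)) = l2.length :=
      List.countP_eq_length.2 (fun kv hkv => by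
        simpa using h kv (by simp [hkv]) (hnd' kv (List.mem_append.2 (Or.inr hkv))))
    simp [List.length_append, h1, h2]

theorem count_dedup (xs : List Int) (v : Int) :
    List.count v (PySem.List.dedup xs) = if v ∈ xs then 1 else 0 := by
  rw [PySem.List.dedup_eq_ofList]
  by_cases h : v ∈ xs
  · rw [if_pos h]
    exact List.count_eq_one_of_mem (PySem.Set.nodup_ofList xs) ((PySem.Set.mem_ofList xs v).2 h)
  · simp [h, List.count_eq_zero_of_not_mem (fun hc => h ((PySem.Set.mem_ofList xs v).1 hc))]

theorem countsB_getD_aux (l : List (String × List Int)) (d : PySem.Dict Int Int) (v : Int) :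
    (l.foldl (fun c nv => (PySem.List.dedup nv.2).foldl (fun c v => c.modify v 0 (· + 1)) c) d).getD v 0
      = d.getD v 0 + (l.countP (fun nv => decide (v ∈ nv.2)) : Int) := by
  induction l generalizing d with
  | nil => simp
  | cons nv rest ih =>
    rw [List.foldl_cons, ih, PySem.Dict.getD_foldl_modify_add_one, count_dedup]
    rw [List.countP_cons]
    by_cases h : v ∈ nv.2 <;> simp [h] <;> try ring

theorem keys_inner (c : PySem.Dict Int Int) (xs : List Int) :
    ((PySem.List.dedup xs).foldl (fun c v => c.modify v 0 (· + 1)) c).keys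
      = PySem.Set.update c.keys (PySem.List.dedup xs) :=
  PySem.Dict.keys_foldl_modify (PySem.List.dedup xs) 0 (fun _ _ => (· + 1)) c

theorem mem_keys_countsB_aux (l : List (String × List Int)) (d : PySem.Dict Int Int) (v : Int) :
    v ∈ (l.foldl (fun c nv => (PySem.List.dedup nv.2).foldl (fun c v => c.modify v 0 (· + 1)) c) d).keys
      ↔ v ∈ d.keys ∨ ∃ nv ∈ l, v ∈ nv.2 := by
  induction l generalizing d with
  | nil => simp
  | cons nv rest ih =>
    rw [List.foldl_cons, ih, keys_inner]
    rw [PySem.Set.mem_update]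
    simp [or_assoc]

theorem nodup_keys_countsB_aux (l : List (String × List Int)) (d : PySem.Dict Int Int)
    (hd : d.keys.Nodup) :
    (l.foldl (fun c nv => (PySem.List.dedup nv.2).foldl (fun c v => c.modify v 0 (· + 1)) c) d).keys.Nodup := by
  induction l generalizing d with
  | nil => exact hd
  | cons nv rest ih =>
    rw [List.foldl_cons]
    exact ih _ (by rw [keys_inner]; exact PySem.Set.nodup_update _ _ hd)

-- A's inner reduce, membership
theorem mem_foldl_interStep (own : List Int) (seqs : List (List Int)) (init : List Int) (v : Int) :
    v ∈ seqs.foldl (interStep own) init ↔ v ∈ init ∧ ∀ s ∈ seqs, v ∈ s ∧ v ∉ own := by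
  induction seqs generalizing init with
  | nil => simp
  | cons s rest ih =>
    simp only [List.foldl_cons, ih, interStep, PySem.Set.mem_inter, PySem.Set.mem_diff,
      PySem.Set.mem_ofList, List.mem_cons]
    constructor
    · rintro ⟨⟨h1, h2, h3⟩, h4⟩
      exact ⟨h1, fun t ht => ht.elim (fun e => e ▸ ⟨h2, h3⟩) (h4 t)⟩
    · rintro ⟨h1, h2⟩
      exact ⟨⟨h1, (h2 s (Or.inl rfl)).1, (h2 s (Or.inl rfl)).2⟩, fun t ht => h2 t (Or.inr ht)⟩

theorem nodup_foldl_interStep (own : List Int) (seqs : List (List Int)) (init : List Int)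
    (h : init.Nodup) : (seqs.foldl (interStep own) init).Nodup := by
  induction seqs generalizing init with
  | nil => exact h
  | cons s rest ih => exact ih _ ((PySem.Set.nodup_ofList init).filter _)

-- B's counter: value and keys
theorem countsB_getD (l : List (String × List Int)) (v : Int) :
    (countsB l).getD v 0 = (l.countP (fun nv => decide (v ∈ nv.2)) : Int) := by
  rw [countsB, countsB_getD_aux]; simp [PySem.Dict.empty, PySem.Dict.getD, PySem.Dict.get?]

theorem mem_keys_countsB (l : List (String × List Int)) (v : Int) :
    v ∈ (countsB l).keys ↔ ∃ nv ∈ l, v ∈ nv.2 := by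
  rw [countsB, mem_keys_countsB_aux]
  simp [PySem.Dict.empty, PySem.Dict.keys]

theorem nodup_keys_countsB (l : List (String × List Int)) : (countsB l).keys.Nodup := by
  rw [countsB]
  exact nodup_keys_countsB_aux l PySem.Dict.empty (by simp [PySem.Dict.empty, PySem.Dict.keys])

-- the characterisations agree
theorem mem_othersA (l : List (String × List Int)) (name : String) (t : List Int)
    (hnd : (l.map Prod.fst).Nodup) :
    t ∈ othersA l name ↔ ∃ kv ∈ l, kv.1 ≠ name ∧ t = kv.2 := by
  rw [othersA_eq l name hnd]
  simp only [List.mem_map, List.mem_filter, bne_iff_ne]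
  constructor
  · rintro ⟨kv, ⟨h1, h2⟩, h3⟩; exact ⟨kv, h1, h2, h3.symm⟩
  · rintro ⟨kv, h1, h2, h3⟩; exact ⟨kv, ⟨h1, h2⟩, h3.symm⟩

theorem nodup_mA (l : List (String × List Int)) (nv : String × List Int) : (mA l nv).Nodup := by
  rw [mA]
  rcases hseq : othersA l nv.1 with _ | ⟨s, rest⟩
  · simp [PySem.List.pyGetD, PySem.List.pyGet?]
  · rw [List.foldl_cons]
    exact nodup_foldl_interStep _ _ _ ((PySem.Set.nodup_ofList _).filter _)

theorem mem_mA (l : List (String × List Int)) (nv : String × List Int) (v : Int)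
    (hnd : (l.map Prod.fst).Nodup) (hm : nv ∈ l) (hlen : 2 ≤ l.length) :
    v ∈ mA l nv ↔ (v ∉ nv.2 ∧ ∀ kv ∈ l, kv.1 ≠ nv.1 → v ∈ kv.2) := by
  obtain ⟨kv0, hkv0, hne0⟩ := exists_other l nv hnd hm hlen
  have hne : othersA l nv.1 ≠ [] := by
    intro h
    have : kv0.2 ∈ othersA l nv.1 := (mem_othersA l nv.1 kv0.2 hnd).2 ⟨kv0, hkv0, hne0, rfl⟩
    rw [h] at this; simp at this
  rw [mA]
  rcases hseq : othersA l nv.1 with _ | ⟨s, rest⟩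
  · exact absurd hseq hne
  · rw [PySem.List.pyGetD_zero_cons, mem_foldl_interStep]
    have hsmem : s ∈ othersA l nv.1 := by rw [hseq]; simp
    constructor
    · rintro ⟨hvs, hall⟩
      have hvo : v ∉ nv.2 := (hall s (by simp)).2
      refine ⟨hvo, fun kv hkv hnekv => ?_⟩
      have : kv.2 ∈ othersA l nv.1 := (mem_othersA l nv.1 kv.2 hnd).2 ⟨kv, hkv, hnekv, rfl⟩
      rw [hseq] at this
      exact (hall kv.2 this).1
    · rintro ⟨hvo, hall⟩
      have hmem_imp : ∀ t, t ∈ othersA l nv.1 → v ∈ t := by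
        intro t ht
        obtain ⟨kv, hkv, hnekv, rfl⟩ := (mem_othersA l nv.1 t hnd).1 ht
        exact hall kv hkv hnekv
      exact ⟨hmem_imp s hsmem, fun t ht => ⟨hmem_imp t (by rw [hseq]; exact ht), hvo⟩⟩

theorem nodup_mB (l : List (String × List Int)) (nv : String × List Int) : (mB l nv).Nodup :=
  (nodup_keys_countsB l).filter _

theorem mem_mB (l : List (String × List Int)) (nv : String × List Int) (v : Int)
    (hnd : (l.map Prod.fst).Nodup) (hm : nv ∈ l) (hlen : 2 ≤ l.length) :
    v ∈ mB l nv ↔ (v ∉ nv.2 ∧ ∀ kv ∈ l, kv.1 ≠ nv.1 → v ∈ kv.2) := by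
  obtain ⟨l1, l2, hsplit⟩ := List.append_of_mem hm
  have hcle := List.countP_le_length (l := l) (p := fun kv => decide (v ∈ kv.2))
  have hlength : 1 ≤ l.length := by omega
  rw [mB, List.mem_filter]
  simp only [Bool.and_eq_true, beq_iff_eq, Bool.not_eq_true']
  rw [countsB_getD, mem_keys_countsB]
  have hcontains : ((PySem.Set.ofList nv.2).contains v = false) ↔ v ∉ nv.2 := by
    rw [← Bool.not_eq_true, not_iff_not.2 ((PySem.Set.contains_iff _ _).trans (PySem.Set.mem_ofList _ _))]
  constructor
  · rintro ⟨hk, hcnt, hcon⟩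
    have hvo : v ∉ nv.2 := hcontains.1 hcon
    have hnat : l.countP (fun kv => decide (v ∈ kv.2)) = l.length - 1 := by omega
    exact ⟨hvo, (countP_split l l1 l2 nv v hnd hsplit hvo).1 hnat⟩
  · rintro ⟨hvo, hall⟩
    obtain ⟨kv0, hkv0, hne0⟩ := exists_other l nv hnd hm hlen
    have hnat : l.countP (fun kv => decide (v ∈ kv.2)) = l.length - 1 :=
      (countP_split l l1 l2 nv v hnd hsplit hvo).2 hall
    exact ⟨⟨kv0, hkv0, hall kv0 hkv0 hne0⟩, by omega, hcontains.2 hvo⟩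

theorem eq_of_nodup_small (X Y : List Int) (hX : X.Nodup) (hY : Y.Nodup)
    (hmem : ∀ v, v ∈ X ↔ v ∈ Y) (hle : ∀ v ∈ X, ∀ w ∈ X, v = w) : X = Y := by
  match X, hX with
  | [], _ => exact ((List.eq_nil_iff_forall_not_mem).2 (fun v hv => by simp [← hmem v] at hv)).symm
  | [a], _ =>
    have haY : a ∈ Y := (hmem a).1 (by simp)
    match Y, hY with
    | [], _ => simp at haY
    | b :: ys, hY =>
      have hb : b ∈ [a] := (hmem b).2 (by simp)
      have hb : b = a := by simpa using hb
      subst hb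
      have : ys = [] := by
        apply List.eq_nil_iff_forall_not_mem.2
        intro v hv
        have : v ∈ [b] := (hmem v).2 (by simp [hv])
        have : v = b := by simpa using this
        exact (List.nodup_cons.1 hY).1 (this ▸ hv)
      simp [this]
  | a :: b :: xs, hX =>
    exact absurd (hle a (by simp) b (by simp)) (by simpa using (List.nodup_cons.1 hX).1 ∘ (by intro h; simp [h]))

theorem mA_eq_mB (l : List (String × List Int)) (nv : String × List Int)
    (hpre : Pre_missedItems l) (hm : nv ∈ l) (hlen : 2 ≤ l.length) :
    mA l nv = mB l nv := by
  obtain ⟨hnd, huniq⟩ := hpre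
  apply eq_of_nodup_small _ _ (nodup_mA l nv) (nodup_mB l nv)
  · intro v
    rw [mem_mA l nv v hnd hm hlen, mem_mB l nv v hnd hm hlen]
  · intro v hv w hw
    obtain ⟨kv0, hkv0, hne0⟩ := exists_other l nv hnd hm hlen
    have hv' := (mem_mA l nv v hnd hm hlen).1 hv
    have hw' := (mem_mA l nv w hnd hm hlen).1 hw
    exact huniq nv hm
      v (List.mem_flatMap.2 ⟨kv0, hkv0, hv'.2 kv0 hkv0 hne0⟩)
      w (List.mem_flatMap.2 ⟨kv0, hkv0, hw'.2 kv0 hkv0 hne0⟩)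
      ⟨hv'.1, hv'.2⟩ ⟨hw'.1, hw'.2⟩

-- ===== VERDICT (by name: the statement is the Claim_ definition above) =====
theorem missedItems_spec : Claim_equal_missedItems := by
  intro l _ hpre
  unfold Spec_missedItems
  rw [missedItems_eq, missedItems_alt_eq]
  by_cases hlen : l.length < 2
  · simp [hlen]
  · simp only [hlen, if_false]
    congr 1
    apply PySem.List.foldl_congr_mem
    intro acc nv hnv
    rw [mA_eq_mB l nv hpre hnv (by omega)]
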